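-- pv_equiv track=rewrite | github.com/norhanelhosseiny/Python-Compiler-With-GUI | compiler.py | enumerate_tokens
-- ===== SOURCE A (Python) =====
-- def enumerate_tokens(tokens):
--     token_dict = {}
--     enumerated_tokens = []
--     id_counter = 1
--     for token_type, token_value in tokens:
--         if token_type == 'Identifier':
--             if token_value not in token_dict:
--                 token_dict[token_value] = f'id{id_counter}'
--                 id_counter += 1
--             enumerated_tokens.append((token_type, token_dict[token_value]))
--         else:
--             enumerated_tokens.append((token_type, token_value))
--     return enumerated_tokens
-- ===== SOURCE B (Python) =====
-- def enumerate_tokens(tokens):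
--     order = dict.fromkeys(v for t, v in tokens if t == 'Identifier')
--     table = {v: f'id{i + 1}' for i, v in enumerate(order)}
--     return [(t, table.get(v, v)) if t == 'Identifier' else (t, v) for t, v in tokens]
-- ===== Notes on version B (the rewrite author's own statement) =====
-- stated objective: alternative
-- what changed: B replaces A's single pass with a lazily grown dict and counter by two passes: first build the complete value->id table from the deduplicated identifier values (dict.fromkeys order), then emit the output as one comprehension over the tokens.
import Mathlib
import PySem

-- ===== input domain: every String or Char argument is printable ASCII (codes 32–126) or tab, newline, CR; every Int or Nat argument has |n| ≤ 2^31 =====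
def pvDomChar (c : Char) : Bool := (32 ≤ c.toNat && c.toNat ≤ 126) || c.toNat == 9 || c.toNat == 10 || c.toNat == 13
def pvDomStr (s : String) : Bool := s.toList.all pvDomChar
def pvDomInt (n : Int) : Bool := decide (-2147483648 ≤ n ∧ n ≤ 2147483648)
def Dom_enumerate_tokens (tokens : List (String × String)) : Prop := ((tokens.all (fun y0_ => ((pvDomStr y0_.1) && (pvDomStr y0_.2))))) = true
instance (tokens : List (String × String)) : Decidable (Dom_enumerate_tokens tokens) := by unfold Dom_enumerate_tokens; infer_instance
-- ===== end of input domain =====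

-- B builds the whole value→id table in a first pass (dedup of identifier values), then emits the
-- output in one map; A grows the table lazily inside a single loop. Same values; objective: alternative.

-- f'id{n}'
def idname (n : Int) : String := "id" ++ PySem.Int.toStr n

-- ===== PORT A =====
def enumerate_tokens (tokens : List (String × String)) : List (String × String) :=
  (tokens.foldl
    (fun (st : PySem.Dict String String × List (String × String) × Int) p =>
      if p.1 == "Identifier" then
        if st.1.contains p.2 then
          (st.1, st.2.1 ++ [(p.1, st.1.getD p.2 "")], st.2.2)
        else
          let d' := st.1.insert p.2 (idname st.2.2)
          (d', st.2.1 ++ [(p.1, d'.getD p.2 "")], st.2.2 + 1)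
      else
        (st.1, st.2.1 ++ [p], st.2.2))
    (PySem.Dict.empty, [], 1)).2.1

-- ===== PORT B =====
def enumerate_tokens_alt (tokens : List (String × String)) : List (String × String) :=
  let order := PySem.List.dedup (tokens.filterMap (fun p => if p.1 == "Identifier" then some p.2 else none))
  let table := (PySem.List.enumerate order 0).foldl
    (fun (d : PySem.Dict String String) q => d.insert q.2 (idname (q.1 + 1))) PySem.Dict.empty
  tokens.map (fun p => if p.1 == "Identifier" then (p.1, table.getD p.2 p.2) else p)

-- ===== PRECONDITION & SPEC =====
def Spec_enumerate_tokens (tokens : List (String × String)) (out : List (String × String)) : Prop := out = enumerate_tokens_alt tokens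
instance (tokens : List (String × String)) (out : List (String × String)) : Decidable (Spec_enumerate_tokens tokens out) := by unfold Spec_enumerate_tokens; infer_instance

-- ===== CLAIM (what is proved, stated in full; the proofs are below) =====
def Claim_equal_enumerate_tokens : Prop := ∀ (tokens : List (String × String)), Dom_enumerate_tokens tokens → Spec_enumerate_tokens tokens (enumerate_tokens tokens)

-- ===== LEMMAS AND PROOFS =====

-- identifier values of a token list
def pvIdvals (xs : List (String × String)) : List String :=
  xs.filterMap (fun p => if p.1 == "Identifier" then some p.2 else none)

-- B's table over a key list
def pvTableOf (L : List String) : PySem.Dict String String :=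
  (PySem.List.enumerate L 0).foldl
    (fun (d : PySem.Dict String String) q => d.insert q.2 (idname (q.1 + 1))) PySem.Dict.empty

lemma pvTableOf_items (L : List String) (h : L.Nodup) :
    (pvTableOf L).items = (PySem.List.enumerate L 0).map (fun q => (q.2, idname (q.1 + 1))) := by
  unfold pvTableOf
  rw [PySem.Dict.items_foldl_insert_fresh]
  · simp [PySem.Dict.empty]
  · intro a _; simp
  · rw [PySem.List.map_snd_enumerate]; exact h

lemma pvTableOf_keys (L : List String) (h : L.Nodup) : (pvTableOf L).keys = L := by
  show ((pvTableOf L).items.map (·.1)) = L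
  rw [pvTableOf_items L h, List.map_map]
  have : ((fun (x : String × String) => x.1) ∘ fun (q : Int × String) => (q.2, idname (q.1 + 1)))
      = (fun (q : Int × String) => q.2) := rfl
  rw [this, PySem.List.map_snd_enumerate]

lemma pvTableOf_getD (L : List String) (h : L.Nodup) {v : String} {k : Nat}
    (hk : PySem.List.index? L v = some k) (d0 : String) :
    (pvTableOf L).getD v d0 = idname ((k : Int) + 1) := by
  obtain ⟨hkl, hv, -⟩ := PySem.List.getElem_of_index?_eq_some hk
  apply PySem.Dict.getD_of_mem_items
  · rw [pvTableOf_items L h]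
    have hmem : ((k : Int), v) ∈ PySem.List.enumerate L 0 := by
      rw [PySem.List.mem_enumerate_iff]
      exact ⟨k, hkl, by simp [hv]⟩
    exact List.mem_map.mpr ⟨((k : Int), v), hmem, rfl⟩
  · rw [pvTableOf_keys L h]; exact h

lemma pvTableOf_append_singleton (L : List String) (v : String) :
    pvTableOf (L ++ [v]) = (pvTableOf L).insert v (idname ((L.length : Int) + 1)) := by
  unfold pvTableOf
  rw [PySem.List.enumerate_append, List.foldl_append]
  simp

-- the step function of A's fold
def pvStepA (st : PySem.Dict String String × List (String × String) × Int) (p : String × String) :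
    PySem.Dict String String × List (String × String) × Int :=
  if p.1 == "Identifier" then
    if st.1.contains p.2 then
      (st.1, st.2.1 ++ [(p.1, st.1.getD p.2 "")], st.2.2)
    else
      let d' := st.1.insert p.2 (idname st.2.2)
      (d', st.2.1 ++ [(p.1, d'.getD p.2 "")], st.2.2 + 1)
  else
    (st.1, st.2.1 ++ [p], st.2.2)

lemma pvDedup_mem_prefix {s : List String} (t : List String) {v : String}
    (hv : v ∈ PySem.List.dedup s) {k : Nat}
    (hk : PySem.List.index? (PySem.List.dedup s) v = some k) :
    PySem.List.index? (PySem.List.dedup (s ++ t)) v = some k := by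
  rw [PySem.List.dedup_eq_ofList, PySem.Set.ofList_append, PySem.Set.update_eq_append_filter,
    PySem.List.index?_append_of_mem]
  · rw [← PySem.List.dedup_eq_ofList]; exact hk
  · rw [← PySem.List.dedup_eq_ofList]; exact hv

lemma pvLoop_inv (rest : List (String × String)) :
    ∀ (s : List String) (acc : List (String × String)),
    (rest.foldl pvStepA (pvTableOf (PySem.List.dedup s), acc, ((PySem.List.dedup s).length : Int) + 1)).2.1
      = acc ++ rest.map (fun p =>
          if p.1 == "Identifier" then
            (p.1, (pvTableOf (PySem.List.dedup (s ++ pvIdvals rest))).getD p.2 p.2)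
          else p) := by
  induction rest with
  | nil => intro s acc; simp
  | cons p rest ih =>
    intro s acc
    by_cases hid : p.1 == "Identifier"
    · have hnd : (PySem.List.dedup s).Nodup := PySem.List.nodup_dedup s
      have hcont : (pvTableOf (PySem.List.dedup s)).contains p.2
          = decide (p.2 ∈ PySem.List.dedup s) := by
        rw [PySem.Dict.contains_eq_decide_mem_keys, pvTableOf_keys _ hnd]
      by_cases hmem : p.2 ∈ PySem.List.dedup s
      · -- seen before
        have hpe : p.1 = "Identifier" := by simpa using hid
        have hksome : (PySem.List.index? (PySem.List.dedup s) p.2).isSome = true :=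
          (PySem.List.index?_isSome_iff _ _).mpr hmem
        obtain ⟨k, hk⟩ := Option.isSome_iff_exists.mp hksome
        have hsame : PySem.List.dedup (s ++ [p.2]) = PySem.List.dedup s := by
          simp only [PySem.List.dedup_eq_ofList, PySem.Set.ofList_append_singleton,
            PySem.Set.add]
          rw [if_pos]
          simpa [PySem.Set.contains, ← PySem.List.dedup_eq_ofList] using hmem
        have step : List.foldl pvStepA
            (pvTableOf (PySem.List.dedup s), acc, ((PySem.List.dedup s).length : Int) + 1) (p :: rest)
            = List.foldl pvStepA
              (pvTableOf (PySem.List.dedup (s ++ [p.2])),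
               acc ++ [(p.1, (pvTableOf (PySem.List.dedup s)).getD p.2 "")],
               ((PySem.List.dedup (s ++ [p.2])).length : Int) + 1) rest := by
          rw [hsame]
          simp only [List.foldl_cons]
          unfold pvStepA
          simp only [hid, hcont, decide_eq_true hmem, if_true]
        rw [step, ih]
        have hIdv : pvIdvals (p :: rest) = p.2 :: pvIdvals rest := by
          simp [pvIdvals, hpe]
        have hkfull := pvDedup_mem_prefix (pvIdvals (p :: rest)) hmem hk
        have hndfull : (PySem.List.dedup (s ++ pvIdvals (p :: rest))).Nodup :=
          PySem.List.nodup_dedup _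
        simp only [List.append_assoc, List.singleton_append, ← hIdv]
        simp only [List.map_cons, hid, if_true]
        rw [pvTableOf_getD _ hnd hk "", pvTableOf_getD _ hndfull hkfull p.2]
      · -- fresh identifier value
        have hnotins : p.2 ∉ s := fun h => hmem (by rw [PySem.List.mem_dedup]; exact h)
        have hgrow : PySem.List.dedup (s ++ [p.2]) = PySem.List.dedup s ++ [p.2] := by
          simp only [PySem.List.dedup_eq_ofList, PySem.Set.ofList_append_singleton, PySem.Set.add]
          rw [if_neg]
          simpa [PySem.Set.contains, ← PySem.List.dedup_eq_ofList] using hmem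
        have hk : PySem.List.index? (PySem.List.dedup (s ++ [p.2])) p.2
            = some (PySem.List.dedup s).length := by
          rw [hgrow]; exact PySem.List.index?_append_singleton_self _ _ hmem
        have step : List.foldl pvStepA
            (pvTableOf (PySem.List.dedup s), acc, ((PySem.List.dedup s).length : Int) + 1) (p :: rest)
            = List.foldl pvStepA
              (pvTableOf (PySem.List.dedup (s ++ [p.2])),
               acc ++ [(p.1, idname (((PySem.List.dedup s).length : Int) + 1))],
               ((PySem.List.dedup (s ++ [p.2])).length : Int) + 1) rest := by
          simp only [List.foldl_cons]
          unfold pvStepA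
          simp only [hid, hcont, if_true]
          rw [decide_eq_false hmem]
          simp only [Bool.false_eq_true, if_false]
          rw [hgrow, pvTableOf_append_singleton]
          simp only [PySem.Dict.getD_insert_self, List.length_append, List.length_singleton]
          push_cast
          ring_nf
        rw [step, ih]
        have hpe : p.1 = "Identifier" := by simpa using hid
        have hIdv : pvIdvals (p :: rest) = p.2 :: pvIdvals rest := by
          simp [pvIdvals, hpe]
        have hmemg : p.2 ∈ PySem.List.dedup (s ++ [p.2]) := by
          rw [hgrow]; simp
        have hkfull := pvDedup_mem_prefix (pvIdvals rest) hmemg hk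
        simp only [List.append_assoc, List.singleton_append, ← hIdv] at hkfull
        have hndfull : (PySem.List.dedup (s ++ pvIdvals (p :: rest))).Nodup :=
          PySem.List.nodup_dedup _
        simp only [List.append_assoc, List.singleton_append, ← hIdv]
        simp only [List.map_cons, hid, if_true]
        rw [pvTableOf_getD _ hndfull hkfull p.2]
    · -- not an identifier
      have step : List.foldl pvStepA
          (pvTableOf (PySem.List.dedup s), acc, ((PySem.List.dedup s).length : Int) + 1) (p :: rest)
          = List.foldl pvStepA
            (pvTableOf (PySem.List.dedup s), acc ++ [p], ((PySem.List.dedup s).length : Int) + 1)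
            rest := by
        simp [pvStepA, hid]
      rw [step, ih]
      have hpe : ¬ p.1 = "Identifier" := by simpa using hid
      have hIdv : pvIdvals (p :: rest) = pvIdvals rest := by simp [pvIdvals, hpe]
      simp [hIdv, hpe]

-- ===== VERDICT (by name: the statement is the Claim_ definition above) =====
theorem enumerate_tokens_spec : Claim_equal_enumerate_tokens := by
  intro tokens _
  show enumerate_tokens tokens = enumerate_tokens_alt tokens
  have h := pvLoop_inv tokens [] []
  simp only [PySem.List.dedup_eq_ofList, PySem.Set.ofList_nil] at h
  unfold enumerate_tokens enumerate_tokens_alt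
  rw [show (tokens.foldl
      (fun (st : PySem.Dict String String × List (String × String) × Int) p =>
        if p.1 == "Identifier" then
          if st.1.contains p.2 then
            (st.1, st.2.1 ++ [(p.1, st.1.getD p.2 "")], st.2.2)
          else
            let d' := st.1.insert p.2 (idname st.2.2)
            (d', st.2.1 ++ [(p.1, d'.getD p.2 "")], st.2.2 + 1)
      else
        (st.1, st.2.1 ++ [p], st.2.2))
      (PySem.Dict.empty, [], 1)) = tokens.foldl pvStepA (PySem.Dict.empty, [], 1) from rfl]
  have h0 : (pvTableOf (PySem.List.dedup ([] : List String)), ([] : List (String × String)),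
      ((PySem.List.dedup ([] : List String)).length : Int) + 1)
      = ((PySem.Dict.empty : PySem.Dict String String), ([] : List (String × String)), (1 : Int)) := by
    rfl
  rw [← h0]
  rw [pvLoop_inv tokens [] []]
  simp [pvIdvals, pvTableOf]
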